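-- pv_equiv track=rewrite | github.com/alppozcann/chemical-formula-recognition | new_scripts/arrow_line_recognition.py | find_lines_intersecting_components
-- ===== SOURCE A (Python) =====
-- def find_lines_intersecting_components(detected_lines, labels, centroids, threshold=10):
--     intersecting_lines = []
--     visited_lines = set()
--     # İlk centroid arka plan olduğundan, onu atlıyoruz
--     for cx, cy in centroids[1:]:
--
--          # Centroid'in x ve y koordinatları
--         for (x1, y1), (x2, y2) in detected_lines:
--             # Çizgi için bounding box hesapla
--             x_min = min(x1, x2) - threshold
--             x_max = max(x1, x2) + threshold
--             y_min = min(y1, y2) - threshold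
--             y_max = max(y1, y2) + threshold
--
--             # Eğer centroid bounding box içinde ise
--             if x_min <= cx <= x_max and y_min <= cy <= y_max:
--                 intersecting_lines.append(((x1, y1), (x2, y2)))
--                 visited_lines.add(((x1, y1), (x2, y2)))
--                 find_intersecting_lines(detected_lines, intersecting_lines, visited_lines, x1, x2, y1, y2)
--                 break  # Her centroid için yalnızca bir çizgiyi ekle
--     return intersecting_lines
--
-- def find_intersecting_lines(detected_lines, intersecting_lines, visited_lines, x1, x2, y1, y2, threshold = 10):
--
--     # Çizginin bounding box'ını hesapla
--             x_min = min(x1, x2) - threshold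
--             x_max = max(x1, x2) + threshold
--             y_min = min(y1, y2) - threshold
--             y_max = max(y1, y2) + threshold
--
--
--
--             for (X1, Y1), (X2, Y2) in detected_lines:
--                 if ((X1, Y1), (X2, Y2)) not in visited_lines:
--                     if x_min <= X1 <= x_max and y_min <= Y1 <= y_max or x_min <= X2 <= x_max and y_min <= Y2 <= y_max :
--                         intersecting_lines.append(((X1, Y1), (X2, Y2)))
--                         visited_lines.add(((X1, Y1), (X2, Y2)))
--                         find_intersecting_lines(detected_lines, intersecting_lines, visited_lines, X1, X2, Y1, Y2)
-- ===== SOURCE B (Python) =====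
-- # B: iterative DFS with an explicit stack of bounding boxes (the recursion in A
-- # resumes a frame's scan exactly where rescanning from the start would resume it,
-- # since skipped lines stay skipped), plus the centroid-test boxes precomputed once.
-- # Like A, the connected-line search always pads by 10 (A's recursive helper uses
-- # its default threshold), while `threshold` pads only the centroid test.
--
-- def find_lines_intersecting_components(detected_lines, labels, centroids, threshold=10):
--     PAD = 10  # padding used by the connected-line search (A's helper default)
--
--     def box(p, q, pad):
--         (x1, y1), (x2, y2) = p, q
--         return (min(x1, x2) - pad, max(x1, x2) + pad, min(y1, y2) - pad, max(y1, y2) + pad)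
--
--     # threshold-padded boxes for the centroid test, computed once
--     seed_boxes = [box(p, q, threshold) for p, q in detected_lines]
--
--     out = []
--     visited = set()
--     for cx, cy in centroids[1:]:  # first centroid is the background
--         seed = None
--         for line, (xmn, xmx, ymn, ymx) in zip(detected_lines, seed_boxes):
--             if xmn <= cx <= xmx and ymn <= cy <= ymx:
--                 seed = line
--                 break
--         if seed is None:
--             continue
--         out.append(seed)
--         visited.add(seed)
--         stack = [box(seed[0], seed[1], PAD)]
--         while stack:
--             xmn, xmx, ymn, ymx = stack[-1]
--             nxt = None
--             for (X1, Y1), (X2, Y2) in detected_lines: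
--                 line = ((X1, Y1), (X2, Y2))
--                 if line not in visited and (
--                     xmn <= X1 <= xmx and ymn <= Y1 <= ymx
--                     or xmn <= X2 <= xmx and ymn <= Y2 <= ymx
--                 ):
--                     nxt = line
--                     break
--             if nxt is None:
--                 stack.pop()
--             else:
--                 out.append(nxt)
--                 visited.add(nxt)
--                 stack.append(box(nxt[0], nxt[1], PAD))
--     return out
-- ===== Notes on version B (the rewrite author's own statement) =====
-- stated objective: alternative
-- what changed: A's recursive flood-fill (find_intersecting_lines recursing inside the scan loop) is replaced by an iterative DFS over an explicit stack that holds only bounding boxes and re-scans the line list (skipped lines provably stay skipped), with the threshold-padded boxes for the centroid test precomputed once instead of recomputed per centroid.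
import Mathlib
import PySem

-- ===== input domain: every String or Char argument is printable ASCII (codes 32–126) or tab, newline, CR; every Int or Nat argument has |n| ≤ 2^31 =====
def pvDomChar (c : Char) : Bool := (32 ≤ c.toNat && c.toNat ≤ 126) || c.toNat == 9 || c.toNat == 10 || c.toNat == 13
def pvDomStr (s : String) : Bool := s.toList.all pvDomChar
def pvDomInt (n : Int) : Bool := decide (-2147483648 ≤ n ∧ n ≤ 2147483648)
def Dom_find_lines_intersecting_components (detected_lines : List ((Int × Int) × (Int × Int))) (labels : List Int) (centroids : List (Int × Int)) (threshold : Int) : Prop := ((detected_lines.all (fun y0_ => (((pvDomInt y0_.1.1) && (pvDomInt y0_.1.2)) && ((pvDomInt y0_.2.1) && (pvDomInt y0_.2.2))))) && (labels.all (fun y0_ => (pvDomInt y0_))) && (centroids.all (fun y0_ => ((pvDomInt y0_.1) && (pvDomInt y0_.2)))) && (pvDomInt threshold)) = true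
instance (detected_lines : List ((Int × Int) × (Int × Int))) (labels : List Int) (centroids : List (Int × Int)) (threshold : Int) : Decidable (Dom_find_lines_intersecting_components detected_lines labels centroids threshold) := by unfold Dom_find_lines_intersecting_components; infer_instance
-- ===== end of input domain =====

-- B replaces A's recursive flood-fill by an iterative DFS over an explicit stack of
-- bounding boxes (re-scanning the line list from the start, which skips exactly the
-- lines the recursion's resumed frame would skip) and precomputes the threshold-padded
-- boxes for the centroid test once; objective: alternative structure, same results.

-- a detected line: ((x1, y1), (x2, y2))
abbrev pvLn : Type := (Int × Int) × (Int × Int)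

-- ===== PORT A =====

-- the endpoint-in-padded-bbox test 'x_min <= X1 <= x_max and y_min <= Y1 <= y_max or
-- x_min <= X2 <= x_max and y_min <= Y2 <= y_max' (both sources state it verbatim)
def pvTouch (xmin xmax ymin ymax : Int) (l : pvLn) : Bool :=
  decide ((xmin ≤ l.1.1 ∧ l.1.1 ≤ xmax ∧ ymin ≤ l.1.2 ∧ l.1.2 ≤ ymax) ∨
          (xmin ≤ l.2.1 ∧ l.2.1 ≤ xmax ∧ ymin ≤ l.2.2 ∧ l.2.2 ≤ ymax))

-- the 'for (X1, Y1), (X2, Y2) in detected_lines' loop of find_intersecting_lines;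
-- on a match the body of the recursive call (find_intersecting_lines on the matched
-- line's box) is entered inline; the fuel only makes the recursion total:
-- lines.length + 1 provably never runs out, since every nested call is preceded by
-- marking a fresh line visited
def pvLoopA (fuel : Nat) (lines rem : List pvLn) (vis : PySem.Set pvLn)
    (acc : List pvLn) (xmin xmax ymin ymax : Int) : List pvLn × PySem.Set pvLn :=
  match rem with
  | [] => (acc, vis)
  | l :: rest =>
    if !(PySem.Set.contains vis l) && pvTouch xmin xmax ymin ymax l then
      let r :=
        match fuel with
        | 0 => (acc ++ [l], PySem.Set.add vis l)
        | f + 1 =>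
          pvLoopA f lines lines (PySem.Set.add vis l) (acc ++ [l])
            (min l.1.1 l.2.1 - 10) (max l.1.1 l.2.1 + 10) (min l.1.2 l.2.2 - 10) (max l.1.2 l.2.2 + 10)
      pvLoopA fuel lines rest r.2 r.1 xmin xmax ymin ymax
    else pvLoopA fuel lines rest vis acc xmin xmax ymin ymax
termination_by (fuel, rem.length)
decreasing_by
  · exact Prod.Lex.left _ _ (by omega)
  · exact Prod.Lex.right _ (by simp)
  · exact Prod.Lex.right _ (by simp)

-- find_intersecting_lines itself (its recursive calls always use the default
-- threshold 10): compute the padded box, then run the scan loop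
def pvDfsA (fuel : Nat) (lines : List pvLn) (vis : PySem.Set pvLn)
    (acc : List pvLn) (x1 x2 y1 y2 : Int) : List pvLn × PySem.Set pvLn :=
  match fuel with
  | 0 => (acc, vis)
  | f + 1 =>
    pvLoopA f lines lines vis acc (min x1 x2 - 10) (max x1 x2 + 10) (min y1 y2 - 10) (max y1 y2 + 10)

-- the 'for ... in detected_lines: if bbox contains centroid: append; add; dfs; break' scan
def pvSeedLoopA (fuel : Nat) (lines rem : List pvLn) (vis : PySem.Set pvLn)
    (acc : List pvLn) (cx cy t : Int) : List pvLn × PySem.Set pvLn :=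
  match rem with
  | [] => (acc, vis)
  | l :: rest =>
    if decide (min l.1.1 l.2.1 - t ≤ cx ∧ cx ≤ max l.1.1 l.2.1 + t ∧
               min l.1.2 l.2.2 - t ≤ cy ∧ cy ≤ max l.1.2 l.2.2 + t) then
      pvDfsA fuel lines (PySem.Set.add vis l) (acc ++ [l]) l.1.1 l.2.1 l.1.2 l.2.2
    else pvSeedLoopA fuel lines rest vis acc cx cy t

-- the 'for cx, cy in centroids[1:]' loop
def pvCentLoopA (fuel : Nat) (lines : List pvLn) (cents : List (Int × Int))
    (vis : PySem.Set pvLn) (acc : List pvLn) (t : Int) : List pvLn × PySem.Set pvLn :=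
  match cents with
  | [] => (acc, vis)
  | (cx, cy) :: cs =>
    let r := pvSeedLoopA fuel lines lines vis acc cx cy t
    pvCentLoopA fuel lines cs r.2 r.1 t

def find_lines_intersecting_components (detected_lines : List ((Int × Int) × (Int × Int))) (labels : List Int) (centroids : List (Int × Int)) (threshold : Int) : List ((Int × Int) × (Int × Int)) :=
  (pvCentLoopA (detected_lines.length + 1) detected_lines (centroids.drop 1)
    PySem.Set.empty [] threshold).1

-- ===== PORT B =====

-- box(p, q, pad)
def pvBoxB (l : pvLn) (pad : Int) : Int × Int × Int × Int :=
  (min l.1.1 l.2.1 - pad, max l.1.1 l.2.1 + pad, min l.1.2 l.2.2 - pad, max l.1.2 l.2.2 + pad)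

-- number of lines not yet visited (termination measure of the while loop)
def pvUnvis (vis : PySem.Set pvLn) (lines : List pvLn) : Nat :=
  (lines.filter (fun l => !(PySem.Set.contains vis l))).length

theorem pvFilter_len_le {α : Type} (xs : List α) (p q : α → Bool)
    (h : ∀ x, q x = true → p x = true) :
    (xs.filter q).length ≤ (xs.filter p).length := by
  induction xs with
  | nil => simp
  | cons a as ih =>
    rcases hq : q a with _ | _ <;> rcases hp : p a with _ | _ <;>
      simp only [List.filter_cons, hq, hp, if_true, if_false, List.length_cons]
    · exact ih
    · exact Nat.le_succ_of_le ih
    · exact absurd (h a hq) (by simp [hp])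
    · exact Nat.succ_le_succ ih

theorem pvFilter_len_lt {α : Type} (xs : List α) (p q : α → Bool)
    (h : ∀ x, q x = true → p x = true) (a : α) (ha : a ∈ xs)
    (hpa : p a = true) (hqa : q a = false) :
    (xs.filter q).length < (xs.filter p).length := by
  induction xs with
  | nil => cases ha
  | cons b bs ih =>
    rcases List.mem_cons.1 ha with h1 | h1
    · subst h1
      simp only [List.filter_cons, hpa, hqa, if_true, if_false, List.length_cons]
      exact Nat.lt_succ_of_le (pvFilter_len_le bs p q h)
    · rcases hq : q b with _ | _ <;> rcases hp : p b with _ | _ <;>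
        simp only [List.filter_cons, hq, hp, if_true, if_false, List.length_cons]
      · exact ih h1
      · exact Nat.lt_succ_of_lt (ih h1)
      · exact absurd (h b hq) (by simp [hp])
      · exact Nat.succ_lt_succ (ih h1)

theorem pvUnvis_add_lt (lines : List pvLn) (vis : PySem.Set pvLn) (l : pvLn)
    (hl : l ∈ lines) (hv : PySem.Set.contains vis l = false) :
    pvUnvis (PySem.Set.add vis l) lines < pvUnvis vis lines := by
  refine pvFilter_len_lt _ _ _ ?_ l hl ?_ ?_
  · intro x hx
    simp only [Bool.not_eq_eq_eq_not, Bool.not_true, Bool.eq_false_iff, Ne] at hx ⊢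
    intro hc; apply hx
    rw [PySem.Set.contains_iff] at hc ⊢
    exact (PySem.Set.mem_add _ _ _).2 (Or.inl hc)
  · simpa using hv
  · simpa using (PySem.Set.mem_add vis l l).2 (Or.inr rfl)

-- 'while stack:' — pop the top box, find the first unvisited line one of whose
-- endpoints lies in it; none: pop; some: record it and push its box
def pvRunB (lines : List pvLn) (stack : List (Int × Int × Int × Int))
    (vis : PySem.Set pvLn) (acc : List pvLn) : List pvLn × PySem.Set pvLn :=
  match stack with
  | [] => (acc, vis)
  | b :: S =>
    match h : lines.find? (fun l => !(PySem.Set.contains vis l) && pvTouch b.1 b.2.1 b.2.2.1 b.2.2.2 l) with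
    | none => pvRunB lines S vis acc
    | some l => pvRunB lines (pvBoxB l 10 :: b :: S) (PySem.Set.add vis l) (acc ++ [l])
termination_by (pvUnvis vis lines, stack.length)
decreasing_by
  · exact Prod.Lex.right _ (by simp)
  · apply Prod.Lex.left
    have hm := List.mem_of_find?_eq_some h
    have hp := List.find?_some h
    simp only [Bool.and_eq_true, Bool.not_eq_eq_eq_not, Bool.not_true] at hp
    exact pvUnvis_add_lt lines vis l hm hp.1

-- 'cx, cy' in box test on a precomputed box
def pvInBox (b : Int × Int × Int × Int) (cx cy : Int) : Bool :=
  decide (b.1 ≤ cx ∧ cx ≤ b.2.1 ∧ b.2.2.1 ≤ cy ∧ cy ≤ b.2.2.2)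

-- the 'for cx, cy in centroids[1:]' loop: find the seed via zip with the
-- precomputed boxes, then run the stack DFS
def pvCentLoopB (lines : List pvLn) (boxes : List (Int × Int × Int × Int))
    (cents : List (Int × Int)) (vis : PySem.Set pvLn) (acc : List pvLn) :
    List pvLn × PySem.Set pvLn :=
  match cents with
  | [] => (acc, vis)
  | (cx, cy) :: cs =>
    match (lines.zip boxes).find? (fun lb => pvInBox lb.2 cx cy) with
    | none => pvCentLoopB lines boxes cs vis acc
    | some (l, _) =>
      let r := pvRunB lines [pvBoxB l 10] (PySem.Set.add vis l) (acc ++ [l])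
      pvCentLoopB lines boxes cs r.2 r.1

def find_lines_intersecting_components_alt (detected_lines : List ((Int × Int) × (Int × Int))) (labels : List Int) (centroids : List (Int × Int)) (threshold : Int) : List ((Int × Int) × (Int × Int)) :=
  (pvCentLoopB detected_lines (detected_lines.map (fun l => pvBoxB l threshold))
    (centroids.drop 1) PySem.Set.empty []).1

-- ===== PRECONDITION & SPEC =====
def Spec_find_lines_intersecting_components (detected_lines : List ((Int × Int) × (Int × Int))) (labels : List Int) (centroids : List (Int × Int)) (threshold : Int) (out : List ((Int × Int) × (Int × Int))) : Prop := out = find_lines_intersecting_components_alt detected_lines labels centroids threshold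
instance (detected_lines : List ((Int × Int) × (Int × Int))) (labels : List Int) (centroids : List (Int × Int)) (threshold : Int) (out : List ((Int × Int) × (Int × Int))) : Decidable (Spec_find_lines_intersecting_components detected_lines labels centroids threshold out) := by unfold Spec_find_lines_intersecting_components; infer_instance

-- ===== CLAIM (what is proved, stated in full; the proofs are below) =====
def Claim_equal_find_lines_intersecting_components : Prop := ∀ (detected_lines : List ((Int × Int) × (Int × Int))) (labels : List Int) (centroids : List (Int × Int)) (threshold : Int), Dom_find_lines_intersecting_components detected_lines labels centroids threshold → Spec_find_lines_intersecting_components detected_lines labels centroids threshold (find_lines_intersecting_components detected_lines labels centroids threshold)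

-- ===== LEMMAS AND PROOFS =====

-- equation lemmas for the worker functions

theorem pvLoopA_nil (fuel : Nat) (lines : List pvLn) (vis : PySem.Set pvLn)
    (acc : List pvLn) (a b c d : Int) :
    pvLoopA fuel lines [] vis acc a b c d = (acc, vis) := by
  rw [pvLoopA.eq_def]

theorem pvLoopA_cons (fuel : Nat) (lines : List pvLn) (l : pvLn) (rest : List pvLn)
    (vis : PySem.Set pvLn) (acc : List pvLn) (a b c d : Int) :
    pvLoopA fuel lines (l :: rest) vis acc a b c d =
      (if !(PySem.Set.contains vis l) && pvTouch a b c d l then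
        (fun r => pvLoopA fuel lines rest r.2 r.1 a b c d)
          (pvDfsA fuel lines (PySem.Set.add vis l) (acc ++ [l]) l.1.1 l.2.1 l.1.2 l.2.2)
      else pvLoopA fuel lines rest vis acc a b c d) := by
  cases fuel <;> rw [pvLoopA.eq_def] <;> rfl

-- visited only grows along the scan loop
theorem pvLoopA_mono (fuel : Nat) : ∀ (lines rem : List pvLn) (vis : PySem.Set pvLn)
    (acc : List pvLn) (a b c d : Int) (x : pvLn), x ∈ vis →
    x ∈ (pvLoopA fuel lines rem vis acc a b c d).2 := by
  induction fuel with
  | zero =>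
    intro lines rem
    induction rem with
    | nil => intro vis acc a b c d x hx; rw [pvLoopA_nil]; exact hx
    | cons l rest ih =>
      intro vis acc a b c d x hx
      rw [pvLoopA_cons]
      split
      · exact ih _ _ _ _ _ _ _ ((PySem.Set.mem_add vis l x).2 (Or.inl hx))
      · exact ih _ _ _ _ _ _ _ hx
  | succ f ihf =>
    intro lines rem
    induction rem with
    | nil => intro vis acc a b c d x hx; rw [pvLoopA_nil]; exact hx
    | cons l rest ih =>
      intro vis acc a b c d x hx
      rw [pvLoopA_cons]
      split
      · exact ih _ _ _ _ _ _ _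
          (ihf _ _ _ _ _ _ _ _ _ ((PySem.Set.mem_add vis l x).2 (Or.inl hx)))
      · exact ih _ _ _ _ _ _ _ hx

theorem pvUnvis_le (vis : PySem.Set pvLn) (lines : List pvLn) :
    pvUnvis vis lines ≤ lines.length := List.length_filter_le _ _

theorem pvUnvis_mono (lines : List pvLn) (vis vis' : PySem.Set pvLn)
    (h : ∀ x, x ∈ vis → x ∈ vis') : pvUnvis vis' lines ≤ pvUnvis vis lines := by
  apply pvFilter_len_le
  intro x hx
  simp only [Bool.not_eq_eq_eq_not, Bool.not_true, Bool.eq_false_iff, Ne] at hx ⊢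
  intro hc; apply hx
  rw [PySem.Set.contains_iff] at hc ⊢
  exact h x hc

theorem pvFind_first {α : Type} (p : α → Bool) (pre rest : List α) (l : α)
    (hdead : ∀ x ∈ pre, p x = false) (hl : p l = true) :
    (pre ++ l :: rest).find? p = some l := by
  induction pre with
  | nil => simp [List.find?, hl]
  | cons a pre ih =>
    have := hdead a (List.mem_cons_self)
    simp only [List.cons_append, List.find?, this]
    exact ih (fun x hx => hdead x (List.mem_cons_of_mem _ hx))

theorem pvRunB_none (lines : List pvLn) (b : Int × Int × Int × Int)
    (S : List (Int × Int × Int × Int)) (vis : PySem.Set pvLn) (acc : List pvLn)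
    (hfind : lines.find? (fun l => !(PySem.Set.contains vis l) && pvTouch b.1 b.2.1 b.2.2.1 b.2.2.2 l) = none) :
    pvRunB lines (b :: S) vis acc = pvRunB lines S vis acc := by
  rw [pvRunB.eq_def]
  have h2 : (match h : List.find? (fun l => !vis.contains l && pvTouch b.1 b.2.1 b.2.2.1 b.2.2.2 l) lines with
    | none => pvRunB lines S vis acc
    | some l => pvRunB lines (pvBoxB l 10 :: b :: S) (vis.add l) (acc ++ [l])) = pvRunB lines S vis acc := by
    split
    · rfl
    · rename_i l heq; rw [hfind] at heq; simp at heq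
  exact h2

theorem pvRunB_some (lines : List pvLn) (b : Int × Int × Int × Int)
    (S : List (Int × Int × Int × Int)) (vis : PySem.Set pvLn) (acc : List pvLn) (l : pvLn)
    (hfind : lines.find? (fun l => !(PySem.Set.contains vis l) && pvTouch b.1 b.2.1 b.2.2.1 b.2.2.2 l) = some l) :
    pvRunB lines (b :: S) vis acc =
      pvRunB lines (pvBoxB l 10 :: b :: S) (PySem.Set.add vis l) (acc ++ [l]) := by
  rw [pvRunB.eq_def]
  have h2 : (match h : List.find? (fun l' => !vis.contains l' && pvTouch b.1 b.2.1 b.2.2.1 b.2.2.2 l') lines with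
    | none => pvRunB lines S vis acc
    | some l' => pvRunB lines (pvBoxB l' 10 :: b :: S) (vis.add l') (acc ++ [l']))
      = pvRunB lines (pvBoxB l 10 :: b :: S) (PySem.Set.add vis l) (acc ++ [l]) := by
    split
    · rename_i heq; rw [hfind] at heq; simp at heq
    · rename_i l' heq; rw [hfind] at heq; cases heq; rfl
  exact h2

theorem pvRunB_nil (lines : List pvLn) (vis : PySem.Set pvLn) (acc : List pvLn) :
    pvRunB lines [] vis acc = (acc, vis) := by
  rw [pvRunB.eq_def]

theorem pvBool_true (c t : Bool) (h : (!c && t) = true) : c = false ∧ t = true := by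
  revert h; cases c <;> cases t <;> decide

theorem pvBool_false (c t : Bool) (h : (!c && t) = false) : c = true ∨ t = false := by
  revert h; cases c <;> cases t <;> decide

-- the simulation: one stack frame of B runs A's scan loop on the not-yet-scanned
-- suffix `rem`, provided every line before `rem` fails the frame's test
theorem pv_sim (lines : List pvLn) :
    ∀ (n g : Nat) (vis : PySem.Set pvLn), pvUnvis vis lines ≤ n → pvUnvis vis lines ≤ g →
    ∀ (rem pre acc : List pvLn) (b : Int × Int × Int × Int)
      (S : List (Int × Int × Int × Int)),
      lines = pre ++ rem →
      (∀ l' ∈ pre, PySem.Set.contains vis l' = true ∨ pvTouch b.1 b.2.1 b.2.2.1 b.2.2.2 l' = false) →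
      pvRunB lines (b :: S) vis acc =
        pvRunB lines S (pvLoopA g lines rem vis acc b.1 b.2.1 b.2.2.1 b.2.2.2).2
          (pvLoopA g lines rem vis acc b.1 b.2.1 b.2.2.1 b.2.2.2).1 := by
  intro n
  induction n using Nat.strong_induction_on with
  | _ n IH =>
  intro g vis hn hg rem
  induction rem with
  | nil =>
    intro pre acc b S hsplit hdead
    rw [pvLoopA_nil]
    refine pvRunB_none lines b S vis acc (List.find?_eq_none.2 ?_)
    intro x hx
    have hx' : x ∈ pre := by rw [hsplit] at hx; simpa using hx
    rcases hdead x hx' with h | h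
    · simp only [h, Bool.not_true, Bool.false_and]; simp
    · simp only [h, Bool.and_false]; simp
  | cons l rest ihrem =>
    intro pre acc b S hsplit hdead
    rw [pvLoopA_cons]
    by_cases hp : (!(PySem.Set.contains vis l) && pvTouch b.1 b.2.1 b.2.2.1 b.2.2.2 l) = true
    · rw [if_pos hp]
      obtain ⟨hcv, htv⟩ := pvBool_true _ _ hp
      have hlmem : l ∈ lines := by rw [hsplit]; exact List.mem_append_right _ List.mem_cons_self
      have hpos : 0 < pvUnvis vis lines := by
        apply List.length_pos_of_mem (a := l)
        refine List.mem_filter.2 ⟨hlmem, ?_⟩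
        show (!PySem.Set.contains vis l) = true
        rw [hcv]; rfl
      obtain ⟨g', rfl⟩ : ∃ g', g = g' + 1 := ⟨g - 1, by omega⟩
      have hadd : pvUnvis (PySem.Set.add vis l) lines < pvUnvis vis lines :=
        pvUnvis_add_lt lines vis l hlmem hcv
      have hfind : lines.find? (fun l => !(PySem.Set.contains vis l) && pvTouch b.1 b.2.1 b.2.2.1 b.2.2.2 l) = some l := by
        rw [hsplit]
        refine pvFind_first _ pre rest l ?_ hp
        intro x hx
        rcases hdead x hx with h | h
        · simp only [h, Bool.not_true, Bool.false_and]
        · simp only [h, Bool.and_false]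
      rw [pvRunB_some lines b S vis acc l hfind]
      -- step into the fresh frame: A's recursive call on the matched line's box
      have hstep := IH (pvUnvis (PySem.Set.add vis l) lines) (by omega) g'
        (PySem.Set.add vis l) le_rfl (by omega) lines [] (acc ++ [l]) (pvBoxB l 10)
        (b :: S) rfl (by intro x hx; cases hx)
      have hdfs : pvDfsA (g' + 1) lines (PySem.Set.add vis l) (acc ++ [l]) l.1.1 l.2.1 l.1.2 l.2.2
          = pvLoopA g' lines lines (PySem.Set.add vis l) (acc ++ [l])
              (pvBoxB l 10).1 (pvBoxB l 10).2.1 (pvBoxB l 10).2.2.1 (pvBoxB l 10).2.2.2 := by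
        simp [pvDfsA, pvBoxB]
      rw [hdfs] at *
      set R := pvLoopA g' lines lines (PySem.Set.add vis l) (acc ++ [l])
        (pvBoxB l 10).1 (pvBoxB l 10).2.1 (pvBoxB l 10).2.2.1 (pvBoxB l 10).2.2.2 with hR
      rw [hstep]
      -- resume the interrupted frame: the already-scanned prefix (and l) stays dead
      have hmonoR : ∀ x, x ∈ PySem.Set.add vis l → x ∈ R.2 := by
        intro x hx
        cases g' with
        | zero => exact pvLoopA_mono 0 _ _ _ _ _ _ _ _ _ hx
        | succ f => exact pvLoopA_mono (f + 1) _ _ _ _ _ _ _ _ _ hx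
      have hle : pvUnvis R.2 lines ≤ pvUnvis (PySem.Set.add vis l) lines :=
        pvUnvis_mono lines _ _ hmonoR
      have hres := IH (pvUnvis R.2 lines) (by omega) (g' + 1) R.2 le_rfl (by omega)
        rest (pre ++ [l]) R.1 b S (by rw [hsplit, List.append_assoc]; rfl) ?_
      · exact hres
      · intro x hx
        rcases List.mem_append.1 hx with h | h
        · rcases hdead x h with h' | h'
          · left
            rw [PySem.Set.contains_iff] at h' ⊢
            exact hmonoR x ((PySem.Set.mem_add vis l x).2 (Or.inl h'))
          · right; exact h'
        · left
          have : x = l := by simpa using h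
          subst this
          rw [PySem.Set.contains_iff]
          exact hmonoR x ((PySem.Set.mem_add vis x x).2 (Or.inr rfl))
    · rw [if_neg hp]
      apply ihrem (pre ++ [l]) acc b S (by rw [hsplit, List.append_assoc]; rfl)
      intro x hx
      rcases List.mem_append.1 hx with h | h
      · exact hdead x h
      · have : x = l := by simpa using h
        subst this
        exact pvBool_false _ _ (Bool.not_eq_true _ ▸ Bool.eq_false_iff.2 hp)

-- A's seed scan = B's find? over the zip with the precomputed boxes
theorem pv_seed (fuel : Nat) (lines0 : List pvLn) (cx cy t : Int) :
    ∀ (ls : List pvLn) (vis : PySem.Set pvLn) (acc : List pvLn),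
      pvSeedLoopA fuel lines0 ls vis acc cx cy t =
        (match (ls.zip (ls.map (fun l => pvBoxB l t))).find? (fun lb => pvInBox lb.2 cx cy) with
         | none => (acc, vis)
         | some (l, _) =>
            pvDfsA fuel lines0 (PySem.Set.add vis l) (acc ++ [l]) l.1.1 l.2.1 l.1.2 l.2.2) := by
  intro ls
  induction ls with
  | nil => intro vis acc; simp [pvSeedLoopA]
  | cons l ls ih =>
    intro vis acc
    have hd : (decide (min l.1.1 l.2.1 - t ≤ cx ∧ cx ≤ max l.1.1 l.2.1 + t ∧
        min l.1.2 l.2.2 - t ≤ cy ∧ cy ≤ max l.1.2 l.2.2 + t)) = pvInBox (l, pvBoxB l t).2 cx cy := rfl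
    rcases hbx : pvInBox (l, pvBoxB l t).2 cx cy with _ | _
    · have hneg := List.find?_cons_of_neg (l := (ls.zip (ls.map fun l => pvBoxB l t)))
        (p := fun lb => pvInBox lb.2 cx cy) (a := (l, pvBoxB l t)) (by simp [hbx])
      simp only [List.map_cons, List.zip_cons_cons, hneg]
      rw [pvSeedLoopA, hd, hbx]
      simp only [Bool.false_eq_true, if_false]
      exact ih vis acc
    · have hpos := List.find?_cons_of_pos (l := (ls.zip (ls.map fun l => pvBoxB l t)))
        (p := fun lb => pvInBox lb.2 cx cy) (a := (l, pvBoxB l t)) (by simp [hbx])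
      simp only [List.map_cons, List.zip_cons_cons, hpos]
      rw [pvSeedLoopA, hd, hbx]
      simp only [if_true]

-- the centroid loops agree
theorem pv_cent (lines : List pvLn) (t : Int) :
    ∀ (cents : List (Int × Int)) (vis : PySem.Set pvLn) (acc : List pvLn),
      pvCentLoopA (lines.length + 1) lines cents vis acc t =
        pvCentLoopB lines (lines.map (fun l => pvBoxB l t)) cents vis acc := by
  intro cents
  induction cents with
  | nil => intro vis acc; rfl
  | cons c cs ih =>
    obtain ⟨cx, cy⟩ := c
    intro vis acc
    rw [pvCentLoopA, pv_seed]
    rcases hf : (lines.zip (lines.map fun l => pvBoxB l t)).find? (fun lb => pvInBox lb.2 cx cy)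
      with _ | ⟨l, bx⟩
    · rw [pvCentLoopB]
      simp only [hf]
      exact ih vis acc
    · have hlmem : l ∈ lines := (List.of_mem_zip (List.mem_of_find?_eq_some hf)).1
      rw [pvCentLoopB]
      simp only [hf]
      have hsim := pv_sim lines (pvUnvis (PySem.Set.add vis l) lines) lines.length
        (PySem.Set.add vis l) le_rfl (le_trans (pvUnvis_le _ _) le_rfl) lines [] (acc ++ [l])
        (pvBoxB l 10) [] rfl (by intro x hx; cases hx)
      rw [pvRunB_nil] at hsim
      have hdfs : pvDfsA (lines.length + 1) lines (PySem.Set.add vis l) (acc ++ [l]) l.1.1 l.2.1 l.1.2 l.2.2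
          = pvLoopA lines.length lines lines (PySem.Set.add vis l) (acc ++ [l])
              (pvBoxB l 10).1 (pvBoxB l 10).2.1 (pvBoxB l 10).2.2.1 (pvBoxB l 10).2.2.2 := by
        simp [pvDfsA, pvBoxB]
      rw [hdfs, hsim]
      exact ih _ _

-- ===== VERDICT (by name: the statement is the Claim_ definition above) =====
theorem find_lines_intersecting_components_spec : Claim_equal_find_lines_intersecting_components := by
  intro detected_lines labels centroids threshold _
  unfold Spec_find_lines_intersecting_components
  unfold find_lines_intersecting_components find_lines_intersecting_components_alt
  rw [pv_cent]
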